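-- pv_equiv track=rewrite | github.com/Phosmic/regex-toolkit | tests/test_utils.py | is_sorted_by_length_and_alphabetically
-- ===== SOURCE A (Python) =====
-- from collections.abc import Generator, Iterable
--
-- def is_sorted_by_length_and_alphabetically(
--     texts: Iterable[str],
--     reverse: bool = False,
-- ) -> bool:
--     prev_len, prev_text = None, None
--     for text in texts:
--         if prev_len is None:
--             prev_len, prev_text = len(text), text
--         if reverse:
--             if len(text) < prev_len:
--                 return False
--             elif (len(text) == prev_len) and (text > prev_text):
--                 return False
--         else:
--             if len(text) > prev_len:
--                 return False
--             elif (len(text) == prev_len) and (text < prev_text):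
--                 return False
--         prev_len, prev_text = len(text), text
--     return True
-- ===== SOURCE B (Python) =====
-- def is_sorted_by_length_and_alphabetically(texts, reverse=False):
--     items = list(texts)
--     return items == sorted(items, key=lambda t: (-len(t), t), reverse=reverse)
-- ===== Notes on version B (the rewrite author's own statement) =====
-- stated objective: idiomatic
-- what changed: Replaces A's stateful adjacent-pair scan with early returns by materializing the list once and comparing it to its stable sort under the key (-len(t), t) with the reverse flag passed through.
import Mathlib
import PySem

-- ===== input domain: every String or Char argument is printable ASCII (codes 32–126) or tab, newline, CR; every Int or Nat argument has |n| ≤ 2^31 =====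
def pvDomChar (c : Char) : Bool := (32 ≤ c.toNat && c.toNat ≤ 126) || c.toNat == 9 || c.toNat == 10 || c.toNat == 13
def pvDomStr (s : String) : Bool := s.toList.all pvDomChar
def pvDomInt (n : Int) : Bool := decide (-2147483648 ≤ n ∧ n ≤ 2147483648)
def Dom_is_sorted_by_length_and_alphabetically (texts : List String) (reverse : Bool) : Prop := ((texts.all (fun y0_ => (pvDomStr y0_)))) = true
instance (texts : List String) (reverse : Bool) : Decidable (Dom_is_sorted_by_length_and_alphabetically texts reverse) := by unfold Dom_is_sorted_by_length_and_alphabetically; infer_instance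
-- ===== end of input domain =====

-- B replaces A's explicit adjacent-pair scan by one comparison of the list with its
-- stable sort under the key (-len(t), t) (reverse passed through); objective: idiomatic.

-- ===== PORT A =====
-- the loop of A: state = prev = None | (prev_len, prev_text); early 'return False' = result false
def pvGoA (reverse : Bool) (prev : Option (Int × String)) : List String → Bool
  | [] => true
  | t :: ts =>
    let L := PySem.Str.len t
    let p := match prev with
      | none => (L, t)          -- 'if prev_len is None: prev_len, prev_text = len(text), text'
      | some q => q
    if reverse then
      if L < p.1 then false
      else if L = p.1 ∧ p.2 < t then false   -- 'text > prev_text'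
      else pvGoA reverse (some (L, t)) ts
    else
      if p.1 < L then false
      else if L = p.1 ∧ t < p.2 then false   -- 'text < prev_text'
      else pvGoA reverse (some (L, t)) ts

def is_sorted_by_length_and_alphabetically (texts : List String) (reverse : Bool) : Bool :=
  pvGoA reverse none texts

-- ===== PORT B =====
-- Source B: items == sorted(items, key=lambda t: (-len(t), t), reverse=reverse)
def is_sorted_by_length_and_alphabetically_alt (texts : List String) (reverse : Bool) : Bool :=
  texts == PySem.List.sorted2 texts (fun t => -(PySem.Str.len t)) (fun t => t) reverse

-- ===== PRECONDITION & SPEC =====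
def Spec_is_sorted_by_length_and_alphabetically (texts : List String) (reverse : Bool) (out : Bool) : Prop := out = is_sorted_by_length_and_alphabetically_alt texts reverse
instance (texts : List String) (reverse : Bool) (out : Bool) : Decidable (Spec_is_sorted_by_length_and_alphabetically texts reverse out) := by unfold Spec_is_sorted_by_length_and_alphabetically; infer_instance

-- ===== CLAIM (what is proved, stated in full; the proofs are below) =====
def Claim_equal_is_sorted_by_length_and_alphabetically : Prop := ∀ (texts : List String) (reverse : Bool), Dom_is_sorted_by_length_and_alphabetically texts reverse → Spec_is_sorted_by_length_and_alphabetically texts reverse (is_sorted_by_length_and_alphabetically texts reverse)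

-- ===== LEMMAS AND PROOFS =====

-- the comparator sorted2 uses for key (-len t, t) (no reverse)
def pvLt (a b : String) : Bool :=
  decide (-(PySem.Str.len a) < -(PySem.Str.len b)) ||
    (!decide (-(PySem.Str.len b) < -(PySem.Str.len a)) && decide (a < b))

-- the comparator actually used for the given reverse flag
def pvBef (reverse : Bool) : String → String → Bool :=
  if reverse then fun a b => pvLt b a else pvLt

theorem pv_lt_iff (a b : String) :
    pvLt a b = true ↔
      PySem.Str.len b < PySem.Str.len a ∨ (PySem.Str.len a = PySem.Str.len b ∧ a < b) := by
  simp only [pvLt, Bool.or_eq_true, Bool.and_eq_true, Bool.not_eq_true', decide_eq_true_eq,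
    decide_eq_false_iff_not, neg_lt_neg_iff]
  constructor
  · rintro (h | ⟨h1, h2⟩)
    · exact Or.inl h
    · by_cases hlt : PySem.Str.len b < PySem.Str.len a
      · exact Or.inl hlt
      · exact Or.inr ⟨by omega, h2⟩
  · rintro (h | ⟨h1, h2⟩)
    · exact Or.inl h
    · exact Or.inr ⟨by omega, h2⟩

theorem pv_lt_asym (a b : String) (h : pvLt a b = true) : pvLt b a = false := by
  rw [Bool.eq_false_iff]
  intro h'
  rw [pv_lt_iff] at h h'
  rcases h with h | ⟨h1, h2⟩ <;> rcases h' with h' | ⟨h1', h2'⟩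
  · omega
  · omega
  · omega
  · exact absurd h2' (asymm h2)

theorem pv_lt_trans (a b c : String) (h1 : pvLt a b = true) (h2 : pvLt b c = true) :
    pvLt a c = true := by
  rw [pv_lt_iff] at h1 h2 ⊢
  rcases h1 with h1 | ⟨h1, h1'⟩ <;> rcases h2 with h2 | ⟨h2, h2'⟩
  · left; omega
  · left; omega
  · left; omega
  · exact Or.inr ⟨by omega, lt_trans h1' h2'⟩

theorem pv_lt_cmp (a b c : String) (h : pvLt a c = true) :
    pvLt a b = true ∨ pvLt b c = true := by
  rw [pv_lt_iff] at h
  rw [pv_lt_iff, pv_lt_iff]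
  rcases h with h | ⟨h1, h2⟩
  · by_cases hb : PySem.Str.len b < PySem.Str.len a
    · exact Or.inl (Or.inl hb)
    · exact Or.inr (Or.inl (by omega))
  · by_cases hb : PySem.Str.len b < PySem.Str.len a
    · exact Or.inl (Or.inl hb)
    · by_cases hb' : PySem.Str.len c < PySem.Str.len b
      · exact Or.inr (Or.inl hb')
      · rcases lt_or_ge a b with hab | hba
        · exact Or.inl (Or.inr ⟨by omega, hab⟩)
        · exact Or.inr (Or.inr ⟨by omega, lt_of_le_of_lt hba h2⟩)

theorem pvBef_asym (r : Bool) (a b : String) (h : pvBef r a b = true) : pvBef r b a = false := by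
  cases r <;> simp only [pvBef, Bool.false_eq_true, ite_true, ite_false] at * <;>
    exact pv_lt_asym _ _ h

theorem pvBef_trans (r : Bool) (a b c : String) (h1 : pvBef r a b = true)
    (h2 : pvBef r b c = true) : pvBef r a c = true := by
  cases r <;> simp only [pvBef, Bool.false_eq_true, ite_true, ite_false] at * <;>
    [exact pv_lt_trans _ _ _ h1 h2; exact pv_lt_trans _ _ _ h2 h1]

theorem pvBef_cmp (r : Bool) (a b c : String) (h : pvBef r a c = true) :
    pvBef r a b = true ∨ pvBef r b c = true := by
  cases r <;> simp only [pvBef, Bool.false_eq_true, ite_true, ite_false] at * <;>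
    [exact pv_lt_cmp _ _ _ h; exact (pv_lt_cmp _ _ _ h).symm]

theorem pvR_trans (r : Bool) (a b c : String) (h1 : pvBef r b a = false)
    (h2 : pvBef r c b = false) : pvBef r c a = false := by
  rw [Bool.eq_false_iff] at h1 h2 ⊢
  intro hca
  rcases pvBef_cmp r c b a hca with h | h
  · exact h2 h
  · exact h1 h

-- generic facts about the insertion sort behind PySem.List.sorted2
theorem pv_insertBy_append {α : Type} (bef : α → α → Bool) (x : α) (ys : List α)
    (h : ∀ y ∈ ys, bef x y = false) : PySem.List.insertBy bef x ys = ys ++ [x] := by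
  induction ys with
  | nil => rfl
  | cons y ys ih =>
    simp only [PySem.List.insertBy, h y List.mem_cons_self, Bool.false_eq_true, ite_false,
      List.cons_append, List.cons.injEq, true_and]
    exact ih fun z hz => h z (List.mem_cons_of_mem _ hz)

theorem pv_insertBy_pairwise {α : Type} (bef : α → α → Bool)
    (hasym : ∀ a b, bef a b = true → bef b a = false)
    (htr : ∀ a b c, bef a b = true → bef b c = true → bef a c = true)
    (x : α) (ys : List α) (h : ys.Pairwise (fun a b => bef b a = false)) :
    (PySem.List.insertBy bef x ys).Pairwise (fun a b => bef b a = false) := by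
  induction ys with
  | nil => simp [PySem.List.insertBy]
  | cons y ys ih =>
    rcases List.pairwise_cons.mp h with ⟨hy, hys⟩
    by_cases hxy : bef x y = true
    · simp only [PySem.List.insertBy, hxy, ite_true]
      refine List.pairwise_cons.mpr ⟨?_, h⟩
      intro z hz
      rcases List.mem_cons.mp hz with rfl | hz
      · exact hasym _ _ hxy
      · rw [Bool.eq_false_iff]; intro hzx
        have := htr _ _ _ hzx hxy
        rw [hy z hz] at this; exact Bool.false_ne_true this
    · simp only [PySem.List.insertBy, hxy, ite_false]
      refine List.pairwise_cons.mpr ⟨?_, ih hys⟩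
      intro z hz
      rw [PySem.List.mem_insertBy] at hz
      rcases hz with rfl | hz
      · exact Bool.eq_false_iff.mpr hxy
      · exact hy z hz

theorem pv_foldl_ins_pairwise {α : Type} (bef : α → α → Bool)
    (hasym : ∀ a b, bef a b = true → bef b a = false)
    (htr : ∀ a b c, bef a b = true → bef b c = true → bef a c = true)
    (xs acc : List α) (hacc : acc.Pairwise (fun a b => bef b a = false)) :
    (xs.foldl (fun a x => PySem.List.insertBy bef x a) acc).Pairwise
      (fun a b => bef b a = false) := by
  induction xs generalizing acc with
  | nil => exact hacc
  | cons x xs ih => exact ih _ (pv_insertBy_pairwise bef hasym htr x acc hacc)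

theorem pv_foldl_ins_eq_self {α : Type} (bef : α → α → Bool) (xs acc : List α)
    (h : (acc ++ xs).Pairwise (fun a b => bef b a = false)) :
    xs.foldl (fun a x => PySem.List.insertBy bef x a) acc = acc ++ xs := by
  induction xs generalizing acc with
  | nil => simp
  | cons x xs ih =>
    have hx : ∀ y ∈ acc, bef x y = false := by
      intro y hy
      exact (List.pairwise_append.mp h).2.2 y hy x List.mem_cons_self
    simp only [List.foldl_cons, pv_insertBy_append bef x acc hx]
    rw [ih (acc ++ [x]) (by simpa using h)]
    simp

theorem pv_sort_eq_iff {α : Type} (bef : α → α → Bool)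
    (hasym : ∀ a b, bef a b = true → bef b a = false)
    (htr : ∀ a b c, bef a b = true → bef b c = true → bef a c = true)
    (xs : List α) :
    xs.foldl (fun a x => PySem.List.insertBy bef x a) [] = xs ↔
      xs.Pairwise (fun a b => bef b a = false) := by
  constructor
  · intro h
    rw [← h]
    exact pv_foldl_ins_pairwise bef hasym htr xs [] List.Pairwise.nil
  · intro h
    simpa using pv_foldl_ins_eq_self bef xs [] (by simpa using h)

-- for a transitive relation, Pairwise on a cons-cons splits on the first adjacency
theorem pv_pairwise_cons_cons {α : Type} (R : α → α → Prop)
    (htr : ∀ a b c, R a b → R b c → R a c) (a b : α) (l : List α) :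
    (a :: b :: l).Pairwise R ↔ R a b ∧ (b :: l).Pairwise R := by
  constructor
  · intro h
    rcases List.pairwise_cons.mp h with ⟨ha, h⟩
    exact ⟨ha b List.mem_cons_self, h⟩
  · rintro ⟨hab, h⟩
    refine List.pairwise_cons.mpr ⟨?_, h⟩
    intro z hz
    rcases List.mem_cons.mp hz with rfl | hz
    · exact hab
    · exact htr _ _ _ hab ((List.pairwise_cons.mp h).1 z hz)

theorem pv_goA_iff (r : Bool) (ts : List String) (p : String) :
    pvGoA r (some (PySem.Str.len p, p)) ts = true ↔
      (p :: ts).Pairwise (fun a b => pvBef r b a = false) := by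
  induction ts generalizing p with
  | nil => simp [pvGoA]
  | cons t ts ih =>
    rw [pv_pairwise_cons_cons _ (pvR_trans r), ← ih t]
    have hbef : pvBef r t p = false ↔
        ¬ (if r then PySem.Str.len t < PySem.Str.len p ∨
              (PySem.Str.len t = PySem.Str.len p ∧ p < t)
           else PySem.Str.len p < PySem.Str.len t ∨
              (PySem.Str.len t = PySem.Str.len p ∧ t < p)) := by
      cases r <;>
        simp only [pvBef, Bool.false_eq_true, ite_true, ite_false,
          Bool.eq_false_iff, Ne, pv_lt_iff] <;>
        constructor <;> intro h h' <;> apply h <;>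
        · rcases h' with h' | ⟨h1, h2⟩
          · left; omega
          · exact Or.inr ⟨by omega, h2⟩
    cases r <;>
      simp only [pvGoA, if_true, if_false, Bool.false_eq_true] at hbef ⊢ <;>
      split_ifs with h1 h2 <;> simp_all <;> omega

theorem pv_A_iff (texts : List String) (r : Bool) :
    is_sorted_by_length_and_alphabetically texts r = true ↔
      texts.Pairwise (fun a b => pvBef r b a = false) := by
  cases texts with
  | nil => simp [is_sorted_by_length_and_alphabetically, pvGoA]
  | cons t ts =>
    have hfirst : is_sorted_by_length_and_alphabetically (t :: ts) r =
        pvGoA r (some (PySem.Str.len t, t)) ts := by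
      cases r <;>
        simp [is_sorted_by_length_and_alphabetically, pvGoA]
    rw [hfirst, pv_goA_iff]

theorem pv_B_iff (texts : List String) (r : Bool) :
    is_sorted_by_length_and_alphabetically_alt texts r = true ↔
      texts.foldl (fun a x => PySem.List.insertBy (pvBef r) x a) [] = texts := by
  rw [is_sorted_by_length_and_alphabetically_alt, beq_iff_eq]
  have : PySem.List.sorted2 texts (fun t => -(PySem.Str.len t)) (fun t => t) r =
      texts.foldl (fun a x => PySem.List.insertBy (pvBef r) x a) [] := rfl
  rw [this, eq_comm]

-- ===== VERDICT (by name: the statement is the Claim_ definition above) =====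
theorem is_sorted_by_length_and_alphabetically_spec : Claim_equal_is_sorted_by_length_and_alphabetically := by
  intro texts r _
  unfold Spec_is_sorted_by_length_and_alphabetically
  rw [Bool.eq_iff_iff, pv_A_iff, pv_B_iff,
    pv_sort_eq_iff (pvBef r) (pvBef_asym r) (pvBef_trans r)]
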